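-- pv_equiv track=rewrite | github.com/GamerDark125/EjerciciosLibroEbner | 280.py | posicion_inicio_serie_mas_larga
-- ===== SOURCE A (Python) =====
-- def posicion_inicio_serie_mas_larga(lista):
--     # Inicializamos variables para la serie más larga
--     inicio_serie_actual = 0
--     longitud_serie_actual = 1
--
--     # Inicializamos variables para la serie más larga encontrada hasta el momento
--     inicio_serie_mas_larga = 0
--     longitud_serie_mas_larga = 1
--
--     # Si la lista es vacía, no hay series
--     if not lista:
--         return None
--
--     # Iteramos sobre el resto de elementos de la lista
--     for i in range(1, len(lista)):
--         # Si el elemento es igual al anterior, pertenece a la misma serie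
--         if lista[i] == lista[i - 1]:
--             longitud_serie_actual += 1
--         else:
--             # Si la serie actual es más larga que la serie más larga encontrada hasta el momento,
--             # actualizamos las variables de la serie más larga
--             if longitud_serie_actual > longitud_serie_mas_larga:
--                 inicio_serie_mas_larga = inicio_serie_actual
--                 longitud_serie_mas_larga = longitud_serie_actual
--
--             # Comenzamos una nueva serie
--             inicio_serie_actual = i
--             longitud_serie_actual = 1
--
--     # Aseguramos que la última serie también se compare
--     if longitud_serie_actual > longitud_serie_mas_larga:
--         inicio_serie_mas_larga = inicio_serie_actual
--
--     return inicio_serie_mas_larga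
-- ===== SOURCE B (Python) =====
-- def _runs(lista):
--     # maximal runs of consecutive equal elements, as (start, length) pairs
--     runs = []
--     i = 0
--     n = len(lista)
--     while i < n:
--         k = i + 1
--         while k < n and lista[k] == lista[i]:
--             k += 1
--         runs.append((i, k - i))
--         i = k
--     return runs
--
-- def posicion_inicio_serie_mas_larga(lista):
--     best = None
--     best_len = 0
--     for start, length in _runs(lista):
--         if length > best_len:
--             best = start
--             best_len = length
--     return best
-- ===== Notes on version B (the rewrite author's own statement) =====
-- stated objective: alternative
-- what changed: B first materializes the list of maximal runs as (start, length) pairs with a grouping helper, then does a separate scan over the runs keeping the first longest one, instead of A's inline element-by-element bookkeeping with four state variables.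
import Mathlib
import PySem

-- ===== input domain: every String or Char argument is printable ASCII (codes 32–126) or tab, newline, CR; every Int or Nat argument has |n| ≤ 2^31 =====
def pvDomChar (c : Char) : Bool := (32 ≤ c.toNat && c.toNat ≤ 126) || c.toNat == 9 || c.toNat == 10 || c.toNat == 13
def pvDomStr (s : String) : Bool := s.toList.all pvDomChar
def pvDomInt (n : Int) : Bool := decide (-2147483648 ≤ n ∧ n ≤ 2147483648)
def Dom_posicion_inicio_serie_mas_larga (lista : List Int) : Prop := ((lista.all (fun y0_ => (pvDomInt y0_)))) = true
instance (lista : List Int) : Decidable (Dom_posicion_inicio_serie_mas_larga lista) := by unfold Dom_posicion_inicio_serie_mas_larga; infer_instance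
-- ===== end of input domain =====

-- B decomposes the list into maximal runs (start, length) and then scans the runs for
-- the first longest one, instead of A's inline element-by-element bookkeeping; same cost.

-- ===== PORT A =====
-- the for-loop over i in range(1, len(lista)): pairs (lista[i-1], lista[i]) with the
-- explicit index counter i and the four state variables (ica, lca, iml, lml)
def pvLoopA : List (Int × Int) → Int → Int × Int × Int × Int → Int × Int × Int × Int
  | [], _, st => st
  | (prev, cur) :: ps, i, (ica, lca, iml, lml) =>
    if cur == prev then pvLoopA ps (i + 1) (ica, lca + 1, iml, lml)
    else if lca > lml then pvLoopA ps (i + 1) (i, 1, ica, lca)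
    else pvLoopA ps (i + 1) (i, 1, iml, lml)

def posicion_inicio_serie_mas_larga (lista : List Int) : Option Int :=
  match lista with
  | [] => none
  | _ =>
    let st := pvLoopA (lista.zip (lista.drop 1)) 1 (0, 1, 0, 1)
    some (if st.2.1 > st.2.2.2 then st.1 else st.2.2.1)

-- ===== PORT B =====
-- the inner while loop of _runs: k = 1 + (number of further leading elements equal to x)
def pvCount (x : Int) : List Int → Nat
  | [] => 0
  | y :: ys => if y == x then pvCount x ys + 1 else 0

-- _runs: the outer while loop over the remaining suffix, carrying the absolute
-- start index i; each step emits one maximal run (start, length)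
def pvRuns : List Int → Int → List (Int × Int)
  | [], _ => []
  | x :: xs, i =>
    let c := pvCount x xs
    (i, (c : Int) + 1) :: pvRuns (xs.drop c) (i + ((c : Int) + 1))
termination_by l _ => l.length
decreasing_by
  simp only [List.length_drop, List.length_cons]
  omega

-- the scan over the runs keeping the first longest one
def pvBest : List (Int × Int) → Option Int → Int → Option Int
  | [], best, _ => best
  | (s, l) :: rs, best, blen => if l > blen then pvBest rs (some s) l else pvBest rs best blen

def posicion_inicio_serie_mas_larga_alt (lista : List Int) : Option Int :=
  pvBest (pvRuns lista 0) none 0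

-- ===== PRECONDITION & SPEC =====
def Spec_posicion_inicio_serie_mas_larga (lista : List Int) (out : Option Int) : Prop := out = posicion_inicio_serie_mas_larga_alt lista
instance (lista : List Int) (out : Option Int) : Decidable (Spec_posicion_inicio_serie_mas_larga lista out) := by unfold Spec_posicion_inicio_serie_mas_larga; infer_instance

-- ===== CLAIM (what is proved, stated in full; the proofs are below) =====
def Claim_equal_posicion_inicio_serie_mas_larga : Prop := ∀ (lista : List Int), Dom_posicion_inicio_serie_mas_larga lista → Spec_posicion_inicio_serie_mas_larga lista (posicion_inicio_serie_mas_larga lista)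

-- ===== LEMMAS AND PROOFS =====

-- proof-side: runs anchored at start 0, with the shift applied by map afterwards
def pvRunsZ : List Int → List (Int × Int)
  | [] => []
  | x :: xs =>
    let c := pvCount x xs
    ((0 : Int), (c : Int) + 1) :: (pvRunsZ (xs.drop c)).map (fun p => (p.1 + ((c : Int) + 1), p.2))
termination_by l => l.length
decreasing_by
  simp only [List.length_drop, List.length_cons]
  omega

lemma pvRunsZ_cons (x : Int) (xs : List Int) :
    pvRunsZ (x :: xs) = ((0 : Int), (pvCount x xs : Int) + 1) ::
      (pvRunsZ (xs.drop (pvCount x xs))).map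
        (fun p => (p.1 + ((pvCount x xs : Int) + 1), p.2)) := by
  rw [pvRunsZ]

lemma pvRunsZ_nil : pvRunsZ [] = [] := by rw [pvRunsZ]

lemma pvRuns_eq_shift : ∀ (n : Nat) (l : List Int), l.length ≤ n → ∀ (b : Int),
    pvRuns l b = (pvRunsZ l).map (fun p => (p.1 + b, p.2)) := by
  intro n
  induction n with
  | zero =>
    intro l hlen b
    have : l = [] := List.length_eq_zero_iff.mp (Nat.le_zero.mp hlen)
    subst this
    rw [pvRuns, pvRunsZ_nil]
    simp
  | succ n ih =>
    intro l hlen b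
    match l with
    | [] =>
      rw [pvRuns, pvRunsZ_nil]; simp
    | x :: xs =>
      rw [pvRuns, pvRunsZ_cons]
      simp only [List.map_cons, List.map_map]
      have hlen' : (xs.drop (pvCount x xs)).length ≤ n := by
        simp only [List.length_drop]
        simp only [List.length_cons] at hlen
        omega
      rw [ih (xs.drop (pvCount x xs)) hlen' (b + ((pvCount x xs : Int) + 1))]
      congr 1
      · simp only [Prod.mk.injEq, and_true]; omega
      · apply List.map_congr_left
        intro p _
        simp only [Function.comp_apply, Prod.mk.injEq, and_true]
        omega

lemma loopA_append (as bs : List (Int × Int)) (i : Int) (st : Int × Int × Int × Int) :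
    pvLoopA (as ++ bs) i st = pvLoopA bs (i + as.length) (pvLoopA as i st) := by
  induction as generalizing i st with
  | nil => simp [pvLoopA]
  | cons p ps ih =>
    obtain ⟨prev, cur⟩ := p
    obtain ⟨ica, lca, iml, lml⟩ := st
    have hlen : (i + 1) + (ps.length : Int) = i + (((prev, cur) :: ps).length : Int) := by
      push_cast [List.length_cons]; omega
    simp only [List.cons_append, pvLoopA]
    split_ifs <;> rw [ih, hlen]

lemma loopA_replicate (c : Nat) (x : Int) (i ica lca iml lml : Int) :
    pvLoopA (List.replicate c (x, x)) i (ica, lca, iml, lml) = (ica, lca + c, iml, lml) := by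
  induction c generalizing i lca with
  | zero => simp [pvLoopA]
  | succ c ih =>
    simp only [List.replicate_succ, pvLoopA, BEq.rfl, if_true]
    rw [ih]
    simp only [Prod.mk.injEq, and_true, true_and]
    push_cast
    omega

lemma drop_count_head (x : Int) (xs : List Int) (r : Int) (rest' : List Int)
    (h : xs.drop (pvCount x xs) = r :: rest') : (r == x) = false := by
  induction xs with
  | nil => simp [pvCount] at h
  | cons y ys ih =>
    by_cases hy : (y == x) = true
    · simp only [pvCount, hy, if_true, List.drop_succ_cons] at h
      exact ih h
    · simp [pvCount, hy] at h
      obtain ⟨h1, _⟩ := h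
      subst h1
      simpa using hy

lemma zipdec (x : Int) (xs : List Int) :
    (x :: xs).zip xs = List.replicate (pvCount x xs) (x, x) ++
      (match xs.drop (pvCount x xs) with
       | [] => []
       | r :: rest' => (x, r) :: (r :: rest').zip rest') := by
  induction xs generalizing x with
  | nil => simp [pvCount]
  | cons y ys ih =>
    by_cases hy : (y == x) = true
    · have hyx : y = x := by simpa using hy
      subst hyx
      simp only [pvCount, BEq.rfl, if_true, List.drop_succ_cons, List.replicate_succ,
        List.cons_append, List.zip_cons_cons]
      rw [ih y]
    · simp [pvCount, hy]

lemma MAIN : ∀ (n : Nat) (x : Int) (xs : List Int), xs.length ≤ n →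
    ∀ (o iml lml : Int), 1 ≤ lml →
    (let st := pvLoopA ((x :: xs).zip xs) (o + 1) (o, 1, iml, lml);
     some (if st.2.1 > st.2.2.2 then st.1 else st.2.2.1))
    = pvBest ((pvRunsZ (x :: xs)).map (fun p => (p.1 + o, p.2))) (some iml) lml := by
  intro n
  induction n with
  | zero =>
    intro x xs hlen o iml lml hlml
    have hxs : xs = [] := List.length_eq_zero_iff.mp (Nat.le_zero.mp hlen)
    subst hxs
    rw [pvRunsZ_cons]
    simp only [List.zip_nil_right, pvLoopA, pvCount, List.drop_nil, List.map_cons, pvBest]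
    have h1 : ¬ ((1 : Int) > lml) := by omega
    have h2 : ¬ (((0 : Nat) : Int) + 1 > lml) := by push_cast; omega
    simp [h1, pvBest, pvRunsZ_nil]
  | succ n ih =>
    intro x xs hlen o iml lml hlml
    set c := pvCount x xs with hc
    rcases hrest : xs.drop c with _ | ⟨r, rest'⟩
    · -- last run: the whole list is a single run of length c+1
      have hz : (x :: xs).zip xs = List.replicate c (x, x) := by
        rw [zipdec x xs, ← hc, hrest]; simp
      have hruns : pvRunsZ (x :: xs) = [((0 : Int), (c : Int) + 1)] := by
        rw [pvRunsZ_cons, ← hc, hrest, pvRunsZ_nil]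
        simp
      rw [hz, hruns, loopA_replicate]
      simp only [List.map_cons, List.map_nil, pvBest]
      by_cases hcmp : (1 : Int) + c > lml
      · have h' : ((c : Int) + 1 > lml) := by omega
        simp [hcmp, h']
      · have h' : ¬ ((c : Int) + 1 > lml) := by omega
        simp [hcmp, h']
    · -- the first run is followed by more elements
      have hrx : (r == x) = false := drop_count_head x xs r rest' (by rw [← hc]; exact hrest)
      have hz : (x :: xs).zip xs =
          List.replicate c (x, x) ++ (x, r) :: (r :: rest').zip rest' := by
        rw [zipdec x xs, ← hc, hrest]
      have hlen' : rest'.length ≤ n := by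
        have h := congrArg List.length hrest
        simp [List.length_drop] at h
        omega
      rw [hz, loopA_append, loopA_replicate]
      simp only [pvLoopA, hrx, Bool.false_eq_true, if_false, List.length_replicate]
      have hruns : pvRunsZ (x :: xs) = ((0 : Int), (c : Int) + 1) ::
          (pvRunsZ (r :: rest')).map (fun p => (p.1 + ((c : Int) + 1), p.2)) := by
        rw [pvRunsZ_cons, ← hc, hrest]
      rw [hruns]
      simp only [List.map_cons, List.map_map, pvBest]
      have hmap : ∀ (iml2 lml2 : Int),
          pvBest ((pvRunsZ (r :: rest')).map
            ((fun p : Int × Int => (p.1 + o, p.2)) ∘ (fun p => (p.1 + ((c : Int) + 1), p.2))))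
            (some iml2) lml2
          = pvBest ((pvRunsZ (r :: rest')).map
            (fun p => (p.1 + (o + (c : Int) + 1), p.2))) (some iml2) lml2 := by
        intro iml2 lml2
        congr 1
        apply List.map_congr_left
        intro p _
        simp only [Function.comp_apply, Prod.mk.injEq, and_true]
        omega
      have harg : o + 1 + (c : Int) + 1 = o + (c : Int) + 1 + 1 := by omega
      have harg2 : o + 1 + (c : Int) = o + (c : Int) + 1 := by omega
      by_cases hcmp : (1 : Int) + c > lml
      · have h' : ((c : Int) + 1 > lml) := by omega
        simp only [hcmp, if_true, h']
        have hih := ih r rest' hlen' (o + (c : Int) + 1) o ((1 : Int) + c) (by omega)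
        simp only at hih
        rw [harg, harg2, hih, hmap,
          (show (0 : Int) + o = o from by omega),
          (show (1 : Int) + (c : Int) = (c : Int) + 1 from by omega)]
      · have h' : ¬ ((c : Int) + 1 > lml) := by omega
        simp only [hcmp, if_false, h']
        have hih := ih r rest' hlen' (o + (c : Int) + 1) iml lml hlml
        simp only at hih
        rw [harg, harg2, hih, hmap]

-- ===== VERDICT (by name: the statement is the Claim_ definition above) =====
theorem posicion_inicio_serie_mas_larga_spec : Claim_equal_posicion_inicio_serie_mas_larga := by
  intro lista _
  unfold Spec_posicion_inicio_serie_mas_larga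
  match lista with
  | [] =>
    show posicion_inicio_serie_mas_larga [] = posicion_inicio_serie_mas_larga_alt []
    rw [posicion_inicio_serie_mas_larga_alt, pvRuns]
    rfl
  | x :: xs =>
    unfold posicion_inicio_serie_mas_larga posicion_inicio_serie_mas_larga_alt
    simp only [List.drop_succ_cons, List.drop_zero]
    have hmain := MAIN xs.length x xs le_rfl 0 0 1 le_rfl
    simp only at hmain
    rw [(by omega : (0 : Int) + 1 = 1)] at hmain
    rw [hmain, pvRuns_eq_shift (x :: xs).length (x :: xs) le_rfl 0, pvRunsZ_cons]
    simp only [List.map_cons, List.map_map, pvBest]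
    set c := pvCount x xs with hc
    have h1 : ((c : Int) + 1 > 0) := by positivity
    have hmap : ((pvRunsZ (xs.drop c)).map
          ((fun p : Int × Int => (p.1 + 0, p.2)) ∘ (fun p => (p.1 + ((c : Int) + 1), p.2))))
        = (pvRunsZ (xs.drop c)).map (fun p => (p.1 + ((c : Int) + 1), p.2)) := by
      apply List.map_congr_left
      intro p _
      simp only [Function.comp_apply, Prod.mk.injEq, and_true]
      omega
    by_cases h2 : ((c : Int) + 1 > 1)
    · simp only [h1, h2, if_true, hmap, (by omega : (0 : Int) + 0 = (0 : Int))]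
    · have hc0 : (c : Int) = 0 := by omega
      simp only [h1, h2, if_true, if_false, hmap, (by omega : (0 : Int) + 0 = (0 : Int))]
      rw [hc0]
      norm_num
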